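-- pv_equiv track=rewrite | github.com/CaptainCuong/Efficient-GNN | src/gnn/data.py | _resolve_fanouts
-- ===== SOURCE A (Python) =====
-- from typing import Iterable, Tuple
--
-- def _resolve_fanouts(fanouts: Iterable[int], depth: int) -> Tuple[int, ...]:
--     sequence = tuple(int(f) for f in fanouts)
--     if len(sequence) < depth:
--         last = sequence[-1]
--         sequence = sequence + (last,) * (depth - len(sequence))
--     elif len(sequence) > depth:
--         sequence = sequence[:depth]
--     return sequence
-- ===== SOURCE B (Python) =====
-- def _resolve_fanouts(fanouts, depth):
--     sequence = tuple(int(f) for f in fanouts)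
--     return tuple(sequence[min(i, len(sequence) - 1)] for i in range(depth))
-- ===== Notes on version B (the rewrite author's own statement) =====
-- stated objective: simpler
-- what changed: Replaced the pad/truncate length-comparison branches by a single branchless clamped-index comprehension over range(depth).
-- outside the precondition, e.g. on _resolve_fanouts([1, 2, 3], -1): A returns (1, 2), B returns ()
import Mathlib
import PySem

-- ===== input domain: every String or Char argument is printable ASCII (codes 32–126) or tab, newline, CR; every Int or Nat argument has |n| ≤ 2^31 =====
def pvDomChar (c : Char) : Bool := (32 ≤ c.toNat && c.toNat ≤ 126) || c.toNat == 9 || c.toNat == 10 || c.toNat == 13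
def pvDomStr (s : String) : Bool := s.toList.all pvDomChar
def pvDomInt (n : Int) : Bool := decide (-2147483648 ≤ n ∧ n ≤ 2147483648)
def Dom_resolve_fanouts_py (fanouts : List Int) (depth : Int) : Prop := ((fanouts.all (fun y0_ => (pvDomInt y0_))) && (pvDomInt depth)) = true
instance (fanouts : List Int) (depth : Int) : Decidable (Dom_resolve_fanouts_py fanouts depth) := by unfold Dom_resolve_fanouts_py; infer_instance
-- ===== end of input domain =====

-- B replaces A's pad/truncate length-comparison branches by one branchless clamped-index pass (objective: simpler).


-- ===== PORT A =====
def resolve_fanouts_py (fanouts : List Int) (depth : Int) : List Int :=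
  let sequence := fanouts.map (fun f => f)          -- tuple(int(f) for f in fanouts); int(f) = f on Int
  if (sequence.length : Int) < depth then
    -- sequence[-1]: IndexError on an empty sequence is excluded by Pre_
    let last := PySem.List.pyGetD sequence (-1) 0
    sequence ++ List.replicate (depth - (sequence.length : Int)).toNat last
  else if (sequence.length : Int) > depth then
    PySem.List.slice sequence none (some depth)
  else
    sequence

-- ===== PORT B =====
def resolve_fanouts_py_alt (fanouts : List Int) (depth : Int) : List Int :=
  let sequence := fanouts.map (fun f => f)
  -- sequence[min(i, len(sequence)-1)]: IndexError on empty sequence with positive depth is excluded by Pre_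
  (PySem.List.pyRange 0 depth 1).map
    (fun i => PySem.List.pyGetD sequence (min i ((sequence.length : Int) - 1)) 0)

-- ===== PRECONDITION & SPEC =====
-- Pre_ excludes (a) empty fanouts with positive depth, where both A and B raise IndexError, and
-- (b) negative depth small enough in magnitude that A's accidental end-trimmed slice
-- sequence[:depth] is nonempty while B naturally yields the empty tuple (a negative depth is not
-- a meaningful fanout depth; negative depths on which A's slice is empty too stay inside).
def Pre_resolve_fanouts_py (fanouts : List Int) (depth : Int) : Prop :=
  (fanouts = [] → depth ≤ 0) ∧ (depth < 0 → (fanouts.length : Int) + depth ≤ 0)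
instance (fanouts : List Int) (depth : Int) : Decidable (Pre_resolve_fanouts_py fanouts depth) := by
  unfold Pre_resolve_fanouts_py; infer_instance

def pvWitness_resolve_fanouts_py : List Int × Int := ([5, 10], 3)

def Spec_resolve_fanouts_py (fanouts : List Int) (depth : Int) (out : List Int) : Prop := out = resolve_fanouts_py_alt fanouts depth
instance (fanouts : List Int) (depth : Int) (out : List Int) : Decidable (Spec_resolve_fanouts_py fanouts depth out) := by unfold Spec_resolve_fanouts_py; infer_instance

-- ===== CLAIM (what is proved, stated in full; the proofs are below) =====
def Claim_equal_resolve_fanouts_py : Prop := ∀ (fanouts : List Int) (depth : Int), Dom_resolve_fanouts_py fanouts depth → Pre_resolve_fanouts_py fanouts depth → Spec_resolve_fanouts_py fanouts depth (resolve_fanouts_py fanouts depth)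

-- ===== LEMMAS AND PROOFS =====

theorem pvWitness_ok :
    Dom_resolve_fanouts_py pvWitness_resolve_fanouts_py.1 pvWitness_resolve_fanouts_py.2 ∧
    Pre_resolve_fanouts_py pvWitness_resolve_fanouts_py.1 pvWitness_resolve_fanouts_py.2 := by
  constructor <;> decide

-- the clamped pass truncates: for d ≤ len xs it is exactly take d
theorem range_map_getD_take (xs : List Int) (d : Nat) (hd : d ≤ xs.length) :
    (List.range d).map (fun k => xs.getD (min k (xs.length - 1)) 0) = xs.take d := by
  apply List.ext_getElem
  · simp [Nat.min_eq_left hd]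
  · intro i h1 h2
    simp only [List.getElem_map, List.getElem_range, List.getElem_take]
    have hi : i < d := by simpa using h1
    have : min i (xs.length - 1) = i := by omega
    rw [this, List.getD_eq_getElem _ _ (by omega)]

-- the clamped pass pads: for len xs < d (xs nonempty) it is xs followed by copies of the last element
theorem range_map_getD_pad (xs : List Int) (hx : xs ≠ []) (d : Nat) (hd : xs.length < d) :
    (List.range d).map (fun k => xs.getD (min k (xs.length - 1)) 0)
      = xs ++ List.replicate (d - xs.length) (xs.getLast hx) := by
  apply List.ext_getElem
  · simp only [List.length_map, List.length_range, List.length_append,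
      List.length_replicate]
    omega
  · intro i h1 h2
    have hxl : 0 < xs.length := List.length_pos_iff.mpr hx
    simp only [List.getElem_map, List.getElem_range]
    by_cases hin : i < xs.length
    · have : min i (xs.length - 1) = i := by omega
      rw [this, List.getD_eq_getElem _ _ hin,
        List.getElem_append_left hin]
    · have : min i (xs.length - 1) = xs.length - 1 := by omega
      rw [this, List.getD_eq_getElem _ _ (by omega),
        List.getElem_append_right (by omega)]
      simp [List.getLast_eq_getElem]

-- ===== VERDICT (by name: the statement is the Claim_ definition above) =====
theorem resolve_fanouts_py_spec : Claim_equal_resolve_fanouts_py := by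
  intro fanouts depth _ hpre
  obtain ⟨hemp, hneg⟩ := hpre
  unfold Spec_resolve_fanouts_py resolve_fanouts_py resolve_fanouts_py_alt
  simp only [List.map_id']
  by_cases hd0 : 0 ≤ depth
  case neg =>
    -- negative depth: A's slice is empty (len + depth ≤ 0) and B's range is empty
    have hdlt : depth < 0 := by omega
    have hle : (fanouts.length : Int) + depth ≤ 0 := hneg hdlt
    have hBnil : PySem.List.pyRange 0 depth 1 = [] := by
      rw [PySem.List.pyRange_one]
      simp only [Int.sub_zero]
      have : depth.toNat = 0 := by omega
      simp [this]
    rw [hBnil, List.map_nil,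
      if_neg (by omega : ¬ ((fanouts.length : Int) < depth)),
      if_pos (by omega : (fanouts.length : Int) > depth)]
    obtain ⟨k, hk, rfl⟩ : ∃ k : Nat, 0 < k ∧ depth = -(k : Int) :=
      ⟨(-depth).toNat, by omega, by omega⟩
    rw [PySem.List.slice_to_neg_natCast fanouts k hk]
    have : fanouts.length - k = 0 := by omega
    simp [this]
  rcases eq_or_ne fanouts [] with hF | hF
  · -- empty fanouts: depth = 0
    have : depth = 0 := le_antisymm (hemp hF) hd0
    subst this; subst hF; decide
  · -- rewrite depth as a Nat cast
    obtain ⟨d, rfl⟩ : ∃ d : Nat, depth = (d : Int) := ⟨depth.toNat, (Int.toNat_of_nonneg hd0).symm⟩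
    have hlen1 : 1 ≤ fanouts.length := List.length_pos_iff.mpr hF
    -- the B side is the clamped Nat-indexed pass
    have hB : (PySem.List.pyRange 0 (d : Int) 1).map
          (fun i => PySem.List.pyGetD fanouts (min i ((fanouts.length : Int) - 1)) 0)
        = (List.range d).map (fun k => fanouts.getD (min k (fanouts.length - 1)) 0) := by
      rw [PySem.List.pyRange_one]
      simp only [Int.sub_zero, Int.toNat_natCast, List.map_map]
      refine List.map_congr_left ?_
      intro k hk
      have hcast : min ((0 : Int) + (k : Int)) ((fanouts.length : Int) - 1)
          = ((min k (fanouts.length - 1) : Nat) : Int) := by omega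
      simp only [Function.comp, hcast, PySem.List.pyGetD_natCast]
    rw [hB]
    by_cases hlt : (fanouts.length : Int) < (d : Int)
    · -- pad branch
      simp only [if_pos hlt]
      rw [PySem.List.pyGetD_neg_one fanouts 0 hF,
        range_map_getD_pad fanouts hF d (by exact_mod_cast hlt)]
      congr 1
      congr 1
      omega
    · -- truncate / equal branch
      have hdle : d ≤ fanouts.length := by exact_mod_cast not_lt.mp hlt
      rw [range_map_getD_take fanouts d hdle]
      simp only [if_neg hlt]
      by_cases hgt : (d : Int) < (fanouts.length : Int)
      · rw [if_pos (by exact_mod_cast hgt), PySem.List.slice_to_natCast]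
      · have : d = fanouts.length := by omega
        simp [this]
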